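-- pv_equiv track=rewrite | github.com/ola-zyn/test | main.py | koncowka
-- ===== SOURCE A (Python) =====
-- def czyPalindrom(a):
--     T=list(a)
--     T2=list(a)
--     T2.reverse()
--     if(T==T2):
--         return True
--     return False
--
-- def koncowka(s):
--     x1=""
--     x2=""
--     T=[]
--     T2=[]
--     for i in range(len(s)):
--         x1=x1+s[i]
--         if(czyPalindrom(x1)):
--             x2=""
--         else:
--             x2=s[i]+x2
--     return x2
-- ===== SOURCE B (Python) =====
-- def koncowka(s):
--     # find the longest palindromic prefix, then reverse the rest
--     for m in range(len(s), 0, -1):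
--         p = s[:m]
--         if p == p[::-1]:
--             return s[m:][::-1]
--     return ""
-- ===== Notes on version B (the rewrite author's own statement) =====
-- stated objective: simpler
-- what changed: B searches downward for the longest palindromic prefix and returns the reversed remaining suffix directly, instead of A's forward scan that rebuilds prefix/suffix strings and re-resets an accumulator at every palindromic prefix.
import Mathlib
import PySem

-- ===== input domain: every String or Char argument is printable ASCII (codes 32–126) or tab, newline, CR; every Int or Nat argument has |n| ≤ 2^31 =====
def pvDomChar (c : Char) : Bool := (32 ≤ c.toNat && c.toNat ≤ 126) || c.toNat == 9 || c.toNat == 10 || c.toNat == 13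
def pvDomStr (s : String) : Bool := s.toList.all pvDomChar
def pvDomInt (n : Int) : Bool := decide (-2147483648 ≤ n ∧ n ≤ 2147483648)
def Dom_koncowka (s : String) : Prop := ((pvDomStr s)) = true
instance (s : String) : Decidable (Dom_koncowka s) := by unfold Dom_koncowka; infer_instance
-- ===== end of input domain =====

-- B finds the longest palindromic prefix by a downward search with early exit and reverses
-- the remaining suffix once, instead of A's forward scan rebuilding two strings at each step;
-- objective: simpler.

-- ===== PORT A =====
-- Python strings are ported through List Char (PySem.Chars convention); exact on the domain.
def czyPalindrom (a : List Char) : Bool :=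
  let T := a
  let T2 := a.reverse
  if T = T2 then true else false

def koncowka (s : String) : String :=
  let l := s.toList
  let r := (List.range l.length).foldl
    (fun (st : List Char × List Char) i =>
      let x1 := st.1 ++ [l.getD i ' ']    -- s[i], i always in range
      let x2 := if czyPalindrom x1 then ([] : List Char) else (l.getD i ' ') :: st.2
      (x1, x2)) ([], [])
  String.ofList r.2

-- ===== PORT B =====
-- the descending loop with early return, as structural recursion on m
def findSuffix (l : List Char) : Nat → List Char
  | 0 => []
  | m + 1 =>
    if (l.take (m + 1)) = (l.take (m + 1)).reverse then (l.drop (m + 1)).reverse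
    else findSuffix l m

def koncowka_alt (s : String) : String :=
  String.ofList (findSuffix s.toList s.toList.length)

-- ===== PRECONDITION & SPEC =====
def Spec_koncowka (s : String) (out : String) : Prop := out = koncowka_alt s
instance (s : String) (out : String) : Decidable (Spec_koncowka s out) := by unfold Spec_koncowka; infer_instance

-- ===== CLAIM (what is proved, stated in full; the proofs are below) =====
def Claim_equal_koncowka : Prop := ∀ (s : String), Dom_koncowka s → Spec_koncowka s (koncowka s)

-- ===== LEMMAS AND PROOFS =====

theorem czyPal_iff (a : List Char) : czyPalindrom a = true ↔ a = a.reverse := by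
  simp only [czyPalindrom]
  split
  · rename_i h; exact iff_of_true rfl h
  · rename_i h; exact iff_of_false (by simp) h

-- appending a character on the right shifts findSuffix by consing it, as long as the
-- search range stays inside the old list and the list is nonempty
theorem findSuffix_append (u : List Char) (c : Char) :
    ∀ j, 1 ≤ j → j ≤ u.length → findSuffix (u ++ [c]) j = c :: findSuffix u j := by
  intro j
  induction j with
  | zero => intro h; omega
  | succ m ih =>
    intro _ hle
    have htake : (u ++ [c]).take (m + 1) = u.take (m + 1) :=
      List.take_append_of_le_length hle
    by_cases hp : u.take (m + 1) = (u.take (m + 1)).reverse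
    · simp only [findSuffix, htake, if_pos hp]
      rw [List.drop_append_of_le_length hle]
      simp
    · rcases Nat.eq_zero_or_pos m with hm | hm
      · subst hm
        exfalso
        apply hp
        have hne : u ≠ [] := by
          intro h; subst h; simp at hle
        obtain ⟨a, t, rfl⟩ := List.exists_cons_of_ne_nil hne
        simp
      · simp only [findSuffix, htake, if_neg hp]
        exact ih hm (by omega)

-- loop invariant for A's fold: after k steps the state is (take k, findSuffix (take k) k)
theorem koncowka_invariant (l : List Char) :
    ∀ k, k ≤ l.length →
      (List.range k).foldl
        (fun (st : List Char × List Char) i =>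
          let x1 := st.1 ++ [l.getD i ' ']
          let x2 := if czyPalindrom x1 then ([] : List Char) else (l.getD i ' ') :: st.2
          (x1, x2)) ([], [])
      = (l.take k, findSuffix (l.take k) k) := by
  intro k
  induction k with
  | zero => intro _; simp [findSuffix]
  | succ k ih =>
    intro hk
    have hk' : k ≤ l.length := by omega
    have hkl : k < l.length := by omega
    rw [List.range_succ, List.foldl_append, ih hk']
    simp only [List.foldl_cons, List.foldl_nil]
    have hget : l.getD k ' ' = l[k] := List.getD_eq_getElem l ' ' hkl
    have htake : l.take (k + 1) = l.take k ++ [l[k]] := by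
      rw [List.take_add_one]
      simp [List.getElem?_eq_getElem hkl]
    rw [hget, ← htake]
    have hself : (l.take (k + 1)).take (k + 1) = l.take (k + 1) := by
      simp [List.take_take]
    by_cases hp : czyPalindrom (l.take (k + 1)) = true
    · have hp' : l.take (k + 1) = (l.take (k + 1)).reverse := (czyPal_iff _).mp hp
      rw [if_pos hp]
      have hnil : findSuffix (l.take (k + 1)) (k + 1) = [] := by
        simp only [findSuffix, hself]
        rw [if_pos hp']
        have hdrop : (l.take (k + 1)).drop (k + 1) = [] :=
          List.drop_eq_nil_of_le (List.length_take_le _ _)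
        simp [hdrop]
      rw [hnil]
    · have hp' : ¬ l.take (k + 1) = (l.take (k + 1)).reverse :=
        fun h => hp ((czyPal_iff _).mpr h)
      rw [if_neg hp]
      have hstep : findSuffix (l.take (k + 1)) (k + 1) = findSuffix (l.take (k + 1)) k := by
        simp only [findSuffix, hself]
        rw [if_neg hp']
      rw [hstep]
      rcases Nat.eq_zero_or_pos k with h0 | h1
      · -- k = 0 : take 1 is a one-char palindrome, contradicting hp'
        exfalso
        apply hp'
        subst h0
        obtain ⟨a, t, rfl⟩ : ∃ a t, l = a :: t := by
          cases l with
          | nil => simp at hkl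
          | cons a t => exact ⟨a, t, rfl⟩
        simp
      · have hulen : k ≤ (l.take k).length := by
          simp [List.length_take_of_le hk']
        rw [htake, findSuffix_append (l.take k) l[k] k h1 hulen]

-- ===== VERDICT (by name: the statement is the Claim_ definition above) =====
theorem koncowka_spec : Claim_equal_koncowka := by
  intro s _
  unfold Spec_koncowka koncowka koncowka_alt
  simp only
  rw [koncowka_invariant s.toList s.toList.length (le_refl _), List.take_length]
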